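-- pv_equiv track=rewrite | github.com/AaqibBhat9/Python | nthmulfibb.py | find_nth_multiple_of_number
-- ===== SOURCE A (Python) =====
-- def generate_fibonacci_series():
--     fibonacci = [0, 1]
--     while True:
--         next_number = fibonacci[-1] + fibonacci[-2]
--         if next_number > 10**18:  # Limiting the Fibonacci series for demonstration purposes
--             break
--         fibonacci.append(next_number)
--     return fibonacci
--
-- def find_nth_multiple_of_number(n, number):
--     fibonacci_series = generate_fibonacci_series()
--     count = 0
--     for fib in fibonacci_series:
--         if fib % number == 0:
--             count += 1
--             if count == n:
--                 return fib
--     return None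
-- ===== SOURCE B (Python) =====
-- def _fib_pair(k):
--     """Fast-doubling: returns (F_k, F_{k+1})."""
--     if k == 0:
--         return (0, 1)
--     a, b = _fib_pair(k // 2)
--     c = a * (2 * b - a)
--     d = a * a + b * b
--     if k % 2 == 0:
--         return (c, d)
--     return (d, c + d)
--
-- def find_nth_multiple_of_number(n, number):
--     # The Fibonacci numbers <= 10**18 are F_0..F_87.  F_k is divisible by
--     # `number` exactly when k is a multiple of the rank of apparition r
--     # (the least k >= 1 with number | F_k), since gcd(F_a, F_b) = F_gcd(a, b).
--     # So the nth multiple in the series is F_{(n-1)*r}; compute it directly.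
--     r = None
--     x = y = 1 % number  # F_1 mod number, F_2 mod number
--     for k in range(1, 88):
--         if x == 0:
--             r = k
--             break
--         x, y = y, (x + y) % number
--     if r is None:  # only F_0 = 0 is divisible within the series
--         return 0 if n == 1 else None
--     idx = (n - 1) * r
--     if idx < 0 or idx > 87:
--         return None
--     return _fib_pair(idx)[0]
-- ===== Notes on version B (the rewrite author's own statement) =====
-- stated objective: alternative
-- what changed: B replaces the scan of the precomputed Fibonacci list by number theory: it finds the rank of apparition r of `number` by iterating Fibonacci residues mod number, locates the nth multiple at index (n-1)*r (valid since gcd(F_a,F_b)=F_gcd(a,b)), and computes that single Fibonacci number by fast doubling.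
import Mathlib
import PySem

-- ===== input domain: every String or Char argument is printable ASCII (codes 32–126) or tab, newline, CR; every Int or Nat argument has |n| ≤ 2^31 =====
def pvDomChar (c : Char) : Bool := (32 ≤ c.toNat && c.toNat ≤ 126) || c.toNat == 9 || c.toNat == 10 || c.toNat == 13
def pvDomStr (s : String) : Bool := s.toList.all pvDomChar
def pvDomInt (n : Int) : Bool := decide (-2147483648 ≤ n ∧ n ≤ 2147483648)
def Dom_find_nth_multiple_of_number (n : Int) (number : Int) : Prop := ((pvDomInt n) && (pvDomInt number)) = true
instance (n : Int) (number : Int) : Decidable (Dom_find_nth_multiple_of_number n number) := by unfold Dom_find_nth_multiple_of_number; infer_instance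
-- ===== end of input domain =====

-- B replaces A's scan of the precomputed Fibonacci list by number theory: it finds the
-- rank of apparition r of `number` from Fibonacci residues mod number, places the nth
-- multiple at index (n-1)*r, and computes that one Fibonacci number by fast doubling.

-- ===== PORT A =====
-- 'while True: … break' loop of generate_fibonacci_series; fuel only makes it total,
-- the 'next > 10^18' break always fires first (the list never gets shorter than 2,
-- so the [-1]/[-2] accesses always succeed; .getD 0 is never used).
def pvGenFibLoop (fib : List Int) : Nat → List Int
  | 0 => fib
  | fuel + 1 =>
    let next := (PySem.List.pyGet? fib (-1)).getD 0 + (PySem.List.pyGet? fib (-2)).getD 0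
    if next > 10 ^ 18 then fib else pvGenFibLoop (fib ++ [next]) fuel

def generate_fibonacci_series : List Int := pvGenFibLoop [0, 1] 200

-- the 'for fib in fibonacci_series' loop with its count accumulator
def pvFindLoopA (n number : Int) : List Int → Int → Option Int
  | [], _ => none
  | fib :: rest, count =>
    if PySem.Int.mod fib number = 0 then
      if count + 1 = n then some fib
      else pvFindLoopA n number rest (count + 1)
    else pvFindLoopA n number rest count

def find_nth_multiple_of_number (n : Int) (number : Int) : Option Int :=
  pvFindLoopA n number generate_fibonacci_series 0

-- ===== PORT B =====
-- _fib_pair: fast doubling, returns (F_k, F_{k+1}); Python recurses on k // 2 and the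
-- only call site has k ≥ 0, where Nat recursion on k / 2 is exact.
def pvFibPair : Nat → Int × Int
  | 0 => (0, 1)
  | k + 1 =>
    let p := pvFibPair ((k + 1) / 2)
    let a := p.1
    let b := p.2
    let c := a * (2 * b - a)
    let d := a * a + b * b
    if (k + 1) % 2 = 0 then (c, d) else (d, c + d)
decreasing_by exact Nat.div_lt_self (Nat.succ_pos k) (by norm_num)

-- the 'for k in range(1, 88)' residue loop with its break (returns Python's r, None = none)
def pvRankLoop (number : Int) : Int → Int → List Int → Option Int
  | _, _, [] => none
  | x, y, k :: ks =>
    if x = 0 then some k else pvRankLoop number y (PySem.Int.mod (x + y) number) ks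

def find_nth_multiple_of_number_alt (n : Int) (number : Int) : Option Int :=
  let x0 := PySem.Int.mod 1 number
  match pvRankLoop number x0 x0 (PySem.List.pyRange 1 88 1) with
  | none => if n = 1 then some 0 else none
  | some r =>
    let idx := (n - 1) * r
    if idx < 0 ∨ idx > 87 then none
    else some (pvFibPair idx.toNat).1

-- ===== PRECONDITION & SPEC =====
-- Pre_ excludes number = 0, on which the Python A (and B) raises ZeroDivisionError.
def Pre_find_nth_multiple_of_number (n : Int) (number : Int) : Prop := number ≠ 0
instance (n : Int) (number : Int) : Decidable (Pre_find_nth_multiple_of_number n number) := by unfold Pre_find_nth_multiple_of_number; infer_instance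
def pvWitness_find_nth_multiple_of_number : Int × Int := (3, 2)

def Spec_find_nth_multiple_of_number (n : Int) (number : Int) (out : Option Int) : Prop := out = find_nth_multiple_of_number_alt n number
instance (n : Int) (number : Int) (out : Option Int) : Decidable (Spec_find_nth_multiple_of_number n number out) := by unfold Spec_find_nth_multiple_of_number; infer_instance

-- ===== CLAIM =====
def Claim_equal_find_nth_multiple_of_number : Prop := ∀ (n : Int) (number : Int), Dom_find_nth_multiple_of_number n number → Pre_find_nth_multiple_of_number n number → Spec_find_nth_multiple_of_number n number (find_nth_multiple_of_number n number)

-- ===== LEMMAS AND PROOFS =====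

-- the Fibonacci list A builds is F_0 .. F_87 (all Fibonacci numbers ≤ 10^18)
set_option maxRecDepth 8000 in
theorem pv_series_eq : generate_fibonacci_series = (List.range 88).map (fun k => (Nat.fib k : Int)) := by
  decide

-- A's counting loop = a countdown loop
def pvLoopList (number : Int) : List Int → Int → Option Int
  | [], _ => none
  | x :: rest, r =>
    if PySem.Int.mod x number = 0 then
      if r - 1 = 0 then some x else pvLoopList number rest (r - 1)
    else pvLoopList number rest r

theorem pvA_eq_list (n number : Int) : ∀ (xs : List Int) (count : Int),
    pvFindLoopA n number xs count = pvLoopList number xs (n - count) := by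
  intro xs
  induction xs with
  | nil => intro count; simp [pvFindLoopA, pvLoopList]
  | cons x rest ih =>
    intro count
    simp only [pvFindLoopA, pvLoopList]
    by_cases h1 : PySem.Int.mod x number = 0
    · by_cases h2 : count + 1 = n
      · have h3 : n - count - 1 = 0 := by omega
        simp [h1, h2, h3]
      · have h3 : ¬ (n - count - 1 = 0) := by omega
        rw [if_pos h1, if_neg h2, if_pos h1, if_neg h3, ih]
        congr 1; omega
    · simp [h1, ih]

-- the countdown loop returns the (r-1)-th element of the filtered list
theorem pvLoopList_eq_get (number : Int) : ∀ (xs : List Int) (r : Int),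
    pvLoopList number xs r =
      if 1 ≤ r then (xs.filter (fun x => decide (PySem.Int.mod x number = 0)))[(r - 1).toNat]? else none := by
  intro xs
  induction xs with
  | nil => intro r; simp [pvLoopList]
  | cons x rest ih =>
    intro r
    simp only [pvLoopList, List.filter_cons]
    by_cases h1 : PySem.Int.mod x number = 0
    · simp only [h1, decide_true, if_pos]
      by_cases h2 : r - 1 = 0
      · have : r = 1 := by omega
        subst this
        simp
      · rw [if_neg h2, ih]
        by_cases h3 : 1 ≤ r
        · have h4 : 1 ≤ r - 1 ∨ r = 1 := by omega
          rcases h4 with h4 | h4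
          · rw [if_pos h4, if_pos h3]
            have : (r - 1).toNat = (r - 1 - 1).toNat + 1 := by omega
            rw [this]
            simp
          · exact absurd (by omega : r - 1 = 0) h2
        · rw [if_neg (by omega : ¬ 1 ≤ r - 1), if_neg h3]
    · simp [h1, ih]

-- Python mod is a homomorphism for addition (any nonzero modulus)
theorem pv_mod_add_mod (m a b : Int) (hm : m ≠ 0) :
    PySem.Int.mod (PySem.Int.mod a m + PySem.Int.mod b m) m = PySem.Int.mod (a + b) m := by
  rcases lt_or_gt_of_ne hm with hneg | hpos
  · have key : ∀ x : Int, PySem.Int.mod x m = -PySem.Int.mod (-x) (-m) := by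
      intro x
      have h := PySem.Int.mod_neg_neg (-x) (-m)
      rw [neg_neg, neg_neg] at h
      rw [← h]
    have hpos' : (0 : Int) < -m := by omega
    rw [key a, key b, key (a + b), key (-PySem.Int.mod (-a) (-m) + -PySem.Int.mod (-b) (-m))]
    simp only [neg_add, neg_neg]
    rw [PySem.Int.mod_eq_emod_of_pos hpos', PySem.Int.mod_eq_emod_of_pos hpos',
        PySem.Int.mod_eq_emod_of_pos hpos', PySem.Int.mod_eq_emod_of_pos hpos']
    rw [← Int.add_emod]
  · rw [PySem.Int.mod_eq_emod_of_pos hpos, PySem.Int.mod_eq_emod_of_pos hpos,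
        PySem.Int.mod_eq_emod_of_pos hpos, PySem.Int.mod_eq_emod_of_pos hpos]
    exact (Int.add_emod a b m).symm

theorem pv_int_dvd_fib_iff (number : Int) (k : Nat) :
    number ∣ (Nat.fib k : Int) ↔ number.natAbs ∣ Nat.fib k := by
  rw [← Int.natAbs_dvd, Int.natCast_dvd_natCast]

-- the residue loop finds the least k in [a, 87] with number | F_k (or none)
theorem pv_rank_aux (number : Int) (hm : number ≠ 0) :
    ∀ (d a : Nat), a + d = 88 → 1 ≤ a →
    (∃ r : Nat, a ≤ r ∧ r ≤ 87 ∧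
       pvRankLoop number (PySem.Int.mod (Nat.fib a) number) (PySem.Int.mod (Nat.fib (a + 1)) number) (PySem.List.pyRange a 88 1) = some (r : Int) ∧
       number ∣ (Nat.fib r : Int) ∧ ∀ j, a ≤ j → j < r → ¬ number ∣ (Nat.fib j : Int))
    ∨ (pvRankLoop number (PySem.Int.mod (Nat.fib a) number) (PySem.Int.mod (Nat.fib (a + 1)) number) (PySem.List.pyRange a 88 1) = none ∧
       ∀ j, a ≤ j → j ≤ 87 → ¬ number ∣ (Nat.fib j : Int)) := by
  intro d
  induction d with
  | zero =>
    intro a ha _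
    have ha88 : a = 88 := by omega
    subst ha88
    right
    constructor
    · rw [PySem.List.pyRange_one_eq_nil (by norm_num)]
      rfl
    · intro j hj1 hj2; omega
  | succ d ih =>
    intro a ha ha1
    have hlt : (a : Int) < 88 := by exact_mod_cast (by omega : a < 88)
    rw [PySem.List.pyRange_one_cons hlt]
    by_cases hdva : number ∣ (Nat.fib a : Int)
    · left
      refine ⟨a, le_refl a, by omega, ?_, hdva, fun j hj1 hj2 => by omega⟩
      have hx0 : PySem.Int.mod (Nat.fib a) number = 0 :=
        (PySem.Int.mod_eq_zero_iff_dvd _ _).mpr hdva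
      rw [pvRankLoop, if_pos hx0]
    · have hx0 : ¬ PySem.Int.mod (Nat.fib a) number = 0 := by
        intro h; exact hdva ((PySem.Int.mod_eq_zero_iff_dvd _ _).mp h)
      rw [pvRankLoop, if_neg hx0]
      have hstep : PySem.Int.mod (PySem.Int.mod (Nat.fib a) number + PySem.Int.mod (Nat.fib (a + 1)) number) number
          = PySem.Int.mod (Nat.fib (a + 1 + 1)) number := by
        rw [pv_mod_add_mod _ _ _ hm]
        congr 1
        push_cast [Nat.fib_add_two]
        ring
      rw [hstep]
      have hcast : (a : Int) + 1 = ((a + 1 : Nat) : Int) := by push_cast; ring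
      rw [hcast]
      rcases ih (a + 1) (by omega) (by omega) with ⟨r, hr1, hr2, hloop, hdvd, hmin⟩ | ⟨hloop, hnone⟩
      · left
        refine ⟨r, by omega, hr2, hloop, hdvd, ?_⟩
        intro j hj1 hj2
        rcases Nat.eq_or_lt_of_le hj1 with heq | hlt'
        · rw [← heq]; exact hdva
        · exact hmin j (by omega) hj2
      · right
        refine ⟨hloop, ?_⟩
        intro j hj1 hj2
        rcases Nat.eq_or_lt_of_le hj1 with heq | hlt'
        · rw [← heq]; exact hdva
        · exact hnone j (by omega) hj2

-- rank of apparition: number | F_k iff r | k, for r the least positive index with number | F_r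
theorem pv_dvd_fib_iff_rank_dvd (number : Int) (r : Nat) (hr1 : 1 ≤ r)
    (hdvd : number ∣ (Nat.fib r : Int))
    (hmin : ∀ j, 1 ≤ j → j < r → ¬ number ∣ (Nat.fib j : Int)) (k : Nat) :
    number ∣ (Nat.fib k : Int) ↔ r ∣ k := by
  set M := number.natAbs with hM
  rw [pv_int_dvd_fib_iff] at hdvd ⊢
  constructor
  · intro hk
    rcases Nat.eq_zero_or_pos k with hk0 | hkpos
    · simp [hk0]
    have hg : M ∣ Nat.fib (r.gcd k) := by
      rw [Nat.fib_gcd]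
      exact Nat.dvd_gcd hdvd hk
    have hg1 : 1 ≤ r.gcd k := Nat.gcd_pos_of_pos_left k hr1
    have hgr : r.gcd k ≤ r := Nat.le_of_dvd hr1 (Nat.gcd_dvd_left r k)
    have hgeq : r.gcd k = r := by
      by_contra hne
      exact (hmin _ hg1 (lt_of_le_of_ne hgr hne)) ((pv_int_dvd_fib_iff number _).mpr hg)
    exact hgeq ▸ Nat.gcd_dvd_right r k
  · intro hrk
    exact dvd_trans hdvd (Nat.fib_dvd r k hrk)

-- the multiples of r in range N, for N ≥ 1
theorem pv_filter_range_dvd (r : Nat) :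
    ∀ N, 1 ≤ N →
    (List.range N).filter (fun k => decide (r ∣ k)) = (List.range ((N - 1) / r + 1)).map (· * r) := by
  intro N
  induction N with
  | zero => omega
  | succ N ih =>
    intro _
    rcases Nat.eq_zero_or_pos N with hN0 | hNpos
    · subst hN0
      simp [List.range_succ, Nat.zero_div]
    · rw [List.range_succ, List.filter_append, ih hNpos]
      have hsucc : N / r = (N - 1) / r + (if r ∣ N then 1 else 0) := by
        have h2 : (N - 1 + 1) / r = (N - 1) / r + if r ∣ N - 1 + 1 then 1 else 0 := Nat.succ_div
        have hN1 : N - 1 + 1 = N := by omega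
        rw [hN1] at h2
        exact h2
      have hsd : (N + 1 - 1) / r = (N - 1) / r + (if r ∣ N then 1 else 0) := by
        simpa using hsucc
      by_cases hd : r ∣ N
      · have hNr : (N - 1) / r + 1 = N / r := by rw [hsucc, if_pos hd]
        have hv : ((N - 1) / r + 1) * r = N := by rw [hNr]; exact Nat.div_mul_cancel hd
        rw [hsd, if_pos hd]
        simp [List.range_succ, hd, hv]
      · rw [hsd, if_neg hd]
        simp [hd]

-- fast doubling computes (F_k, F_{k+1})
theorem pvFibPair_eq : ∀ k : Nat, pvFibPair k = ((Nat.fib k : Int), (Nat.fib (k + 1) : Int)) := by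
  intro k
  induction k using Nat.strong_induction_on with
  | _ k ih =>
    match k with
    | 0 => simp [pvFibPair]
    | k + 1 =>
      rw [pvFibPair]
      have hlt : (k + 1) / 2 < k + 1 := Nat.div_lt_self (Nat.succ_pos k) (by norm_num)
      rw [ih _ hlt]
      set j := (k + 1) / 2 with hj
      have hfle : Nat.fib j ≤ 2 * Nat.fib (j + 1) :=
        le_trans (Nat.fib_le_fib_succ) (by omega)
      have hc : (Nat.fib j : Int) * (2 * (Nat.fib (j + 1) : Int) - (Nat.fib j : Int)) = (Nat.fib (2 * j) : Int) := by
        rw [Nat.fib_two_mul]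
        push_cast [hfle]
        ring
      have hd : (Nat.fib j : Int) * (Nat.fib j : Int) + (Nat.fib (j + 1) : Int) * (Nat.fib (j + 1) : Int) = (Nat.fib (2 * j + 1) : Int) := by
        rw [Nat.fib_two_mul_add_one]
        push_cast
        ring
      by_cases hpar : (k + 1) % 2 = 0
      · have h2j : 2 * j = k + 1 := by omega
        simp only [hpar]
        rw [hc, hd, h2j]
        simp
      · have h2j : 2 * j + 1 = k + 1 := by omega
        have h2j' : 2 * j = k := by omega
        simp only [if_neg hpar]
        rw [hc, hd, h2j, h2j']
        have : (Nat.fib k : Int) + (Nat.fib (k + 1) : Int) = (Nat.fib (k + 1 + 1) : Int) := by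
          push_cast [Nat.fib_add_two]
          ring
        rw [this]

-- ===== VERDICT =====
theorem pv_main (n number : Int) (hpre : number ≠ 0) :
    find_nth_multiple_of_number n number = find_nth_multiple_of_number_alt n number := by
  unfold find_nth_multiple_of_number find_nth_multiple_of_number_alt
  rw [pvA_eq_list, sub_zero, pvLoopList_eq_get, pv_series_eq]
  have e1 : ((Nat.fib 1 : Nat) : Int) = 1 := by norm_num
  have e2 : ((Nat.fib (1 + 1) : Nat) : Int) = 1 := by norm_num [Nat.fib_two]
  have ecast : ((1 : Nat) : Int) = 1 := by norm_num
  rcases pv_rank_aux number hpre 87 1 rfl (le_refl 1) with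
    ⟨r, hr1, hr87, hloop, hdvd, hmin⟩ | ⟨hloop, hnone⟩
  · rw [e1, e2, ecast] at hloop
    simp only [hloop]
    have hrpos : (0 : Int) < (r : Int) := by exact_mod_cast hr1
    have hfilter : ((List.range 88).map (fun k => (Nat.fib k : Int))).filter
        (fun x => decide (PySem.Int.mod x number = 0)) =
        (List.range (87 / r + 1)).map (fun i => (Nat.fib (i * r) : Int)) := by
      rw [List.filter_map]
      have hc : (List.range 88).filter ((fun x => decide (PySem.Int.mod x number = 0)) ∘ (fun k => (Nat.fib k : Int)))
          = (List.range 88).filter (fun k => decide (r ∣ k)) := by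
        apply List.filter_congr
        intro k _
        simp only [Function.comp_apply, decide_eq_decide, PySem.Int.mod_eq_zero_iff_dvd]
        exact pv_dvd_fib_iff_rank_dvd number r hr1 hdvd hmin k
      rw [hc, pv_filter_range_dvd r 88 (by norm_num), List.map_map]
      rfl
    rw [hfilter]
    by_cases hn : 1 ≤ n
    · rw [if_pos hn]
      have hnn : 0 ≤ n - 1 := by omega
      have htn : ((n - 1).toNat : Int) = n - 1 := Int.toNat_of_nonneg hnn
      have hidx : (n - 1) * (r : Int) = (((n - 1).toNat * r : Nat) : Int) := by
        push_cast [htn]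
        ring
      have hidx0 : 0 ≤ (n - 1) * (r : Int) := mul_nonneg hnn (le_of_lt hrpos)
      by_cases hle : (n - 1).toNat * r ≤ 87
      · have hcond : ¬ ((n - 1) * (r : Int) < 0 ∨ (n - 1) * (r : Int) > 87) := by
          rw [hidx]
          push_cast
          omega
        rw [if_neg hcond]
        have hlt : (n - 1).toNat < 87 / r + 1 := by
          have := (Nat.le_div_iff_mul_le (by omega : 0 < r)).mpr hle
          omega
        have htoNat : ((n - 1) * (r : Int)).toNat = (n - 1).toNat * r := by
          rw [hidx]; exact Int.toNat_natCast _
        have hrange : (List.range (87 / r + 1))[(n - 1).toNat]? = some ((n - 1).toNat) := by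
          exact List.getElem?_range hlt
        rw [htoNat, pvFibPair_eq, List.getElem?_map, hrange]
        rfl
      · have hcond : (n - 1) * (r : Int) < 0 ∨ (n - 1) * (r : Int) > 87 := by
          right; rw [hidx]; push_cast; omega
        rw [if_pos hcond]
        have hge : ¬ ((n - 1).toNat < 87 / r + 1) := by
          intro h
          exact hle ((Nat.le_div_iff_mul_le (by omega : 0 < r)).mp (by omega))
        have hlen : ((List.range (87 / r + 1)).map (fun i => (Nat.fib (i * r) : Int))).length ≤ (n - 1).toNat := by
          simp
          omega
        rw [List.getElem?_eq_none hlen]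
    · rw [if_neg hn]
      have hneg : (n - 1) * (r : Int) < 0 := mul_neg_of_neg_of_pos (by omega) hrpos
      rw [if_pos (Or.inl hneg)]
  · rw [e1, e2, ecast] at hloop
    simp only [hloop]
    have hfilter : ((List.range 88).map (fun k => (Nat.fib k : Int))).filter
        (fun x => decide (PySem.Int.mod x number = 0)) = [0] := by
      rw [List.filter_map]
      have hr88 : (List.range 88) = 0 :: (List.range 87).map Nat.succ := List.range_succ_eq_map (n := 87)
      rw [hr88]
      rw [List.filter_cons]
      have h0 : ((fun x => decide (PySem.Int.mod x number = 0)) ∘ (fun k => (Nat.fib k : Int))) 0 = true := by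
        simp [PySem.Int.mod_eq_zero_iff_dvd]
      have htail : ((List.range 87).map Nat.succ).filter
          ((fun x => decide (PySem.Int.mod x number = 0)) ∘ (fun k => (Nat.fib k : Int))) = [] := by
        rw [List.filter_eq_nil_iff]
        intro x hx
        rcases List.mem_map.mp hx with ⟨j, hj, rfl⟩
        have hj87 : j < 87 := List.mem_range.mp hj
        simp only [Function.comp_apply, decide_eq_true_eq, PySem.Int.mod_eq_zero_iff_dvd]
        exact hnone (j + 1) (by omega) (by omega)
      rw [h0, htail]
      simp
    rw [hfilter]
    by_cases hn1 : n = 1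
    · subst hn1
      norm_num
    · rw [if_neg hn1]
      by_cases hn : 1 ≤ n
      · rw [if_pos hn]
        have : (n - 1).toNat ≥ 1 := by omega
        simp only [List.getElem?_eq_none_iff]
        simpa using this
      · rw [if_neg hn]

-- ===== final verdict =====
theorem find_nth_multiple_of_number_spec : Claim_equal_find_nth_multiple_of_number := by
  intro n number _ hpre
  unfold Spec_find_nth_multiple_of_number
  exact pv_main n number hpre
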